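-- pv_equiv track=rewrite | github.com/kenjidesu/leetcode | minimum-number-of-operations-to-move-all-balls-to-each-box/minimum-number-of-operations-to-move-all-balls-to-each-box.py | minOperations
-- ===== SOURCE A (Python) =====
-- def minOperations(boxes):
--     ones = [i for i in range(len(boxes)) if boxes[i] == '1']
--     output = []
--     for i in range(len(boxes)):
--         x = 0
--         for j in ones:
--             x += abs(i - j)
--         output.append(x)
--
--     return output
-- ===== SOURCE B (Python) =====
-- def minOperations(boxes):
--     # Two-pass prefix accumulation: left and right distance costs, combined elementwise.
--     def sweep(chars):
--         cnt = 0
--         ops = 0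
--         out = []
--         for c in chars:
--             out.append(ops)
--             cnt += (c == '1')
--             ops += cnt
--         return out
--     left = sweep(boxes)
--     right = sweep(boxes[::-1])[::-1]
--     return [l + r for l, r in zip(left, right)]
-- ===== Notes on version B (the rewrite author's own statement) =====
-- stated objective: alternative
-- what changed: Replaced the nested loop over every ball position for every index by two linear prefix-accumulation sweeps (left-to-right and right-to-left) combined elementwise.
import Mathlib
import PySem

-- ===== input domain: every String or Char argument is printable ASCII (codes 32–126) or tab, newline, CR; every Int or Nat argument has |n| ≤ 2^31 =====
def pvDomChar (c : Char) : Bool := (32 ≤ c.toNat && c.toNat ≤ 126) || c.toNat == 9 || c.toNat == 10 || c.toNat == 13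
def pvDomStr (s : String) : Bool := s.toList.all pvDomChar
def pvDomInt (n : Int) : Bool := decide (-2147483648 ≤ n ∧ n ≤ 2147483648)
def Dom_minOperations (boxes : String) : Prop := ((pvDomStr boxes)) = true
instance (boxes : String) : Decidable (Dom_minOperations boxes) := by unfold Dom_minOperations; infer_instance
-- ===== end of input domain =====

-- B replaces A's nested loop over all '1' positions by two linear prefix-accumulation
-- sweeps combined elementwise (objective: alternative algorithm).

-- ===== PORT A =====
def minOperations (boxes : String) : List Int :=
  let cs := boxes.toList
  let n : Int := cs.length
  let ones := (PySem.List.pyRange 0 n 1).filter (fun j => PySem.List.pyGet? cs j == some '1')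
  (PySem.List.pyRange 0 n 1).map (fun i => ones.foldl (fun x j => x + |i - j|) 0)

-- ===== PORT B =====
-- sweep(chars): one left-to-right pass accumulating count of '1's and running cost
def pvSweep : List Char → Int → Int → List Int
  | [], _, _ => []
  | c :: cs, cnt, ops =>
      let cnt' := cnt + (if c = '1' then 1 else 0)
      ops :: pvSweep cs cnt' (ops + cnt')

def minOperations_alt (boxes : String) : List Int :=
  let cs := boxes.toList
  let left := pvSweep cs 0 0
  let right := (pvSweep cs.reverse 0 0).reverse
  List.zipWith (· + ·) left right

-- ===== PRECONDITION & SPEC =====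
def Spec_minOperations (boxes : String) (out : List Int) : Prop := out = minOperations_alt boxes
instance (boxes : String) (out : List Int) : Decidable (Spec_minOperations boxes out) := by unfold Spec_minOperations; infer_instance

-- ===== CLAIM (what is proved, stated in full; the proofs are below) =====
def Claim_equal_minOperations : Prop := ∀ (boxes : String), Dom_minOperations boxes → Spec_minOperations boxes (minOperations boxes)

-- ===== LEMMAS AND PROOFS =====

-- total distance from position i to every '1' in cs (cs listed starting at position 0 relative to i)
def pvF : List Char → Int → Int
  | [], _ => 0
  | c :: cs, i => (if c = '1' then |i| else 0) + pvF cs (i - 1)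

-- distance to '1's at or left of position i (clamped)
def pvL : List Char → Int → Int
  | [], _ => 0
  | c :: cs, i => (if c = '1' then max i 0 else 0) + pvL cs (i - 1)

-- distance to '1's at or right of position i (clamped)
def pvR : List Char → Int → Int
  | [], _ => 0
  | c :: cs, i => (if c = '1' then max (-i) 0 else 0) + pvR cs (i - 1)

theorem pvF_split (cs : List Char) (i : Int) : pvF cs i = pvL cs i + pvR cs i := by
  induction cs generalizing i with
  | nil => simp [pvF, pvL, pvR]
  | cons c cs ih =>
      simp only [pvF, pvL, pvR, ih]
      have h : |i| = max i 0 + max (-i) 0 := by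
        by_cases h : 0 ≤ i
        · rw [abs_of_nonneg h]; omega
        · rw [abs_of_neg (by omega : i < 0)]; omega
      split_ifs <;> omega

theorem pvL_nonpos (cs : List Char) (i : Int) (h : i ≤ 0) : pvL cs i = 0 := by
  induction cs generalizing i with
  | nil => simp [pvL]
  | cons c cs ih => simp [pvL, ih (i - 1) (by omega), max_eq_right (by omega : i ≤ 0)]

theorem pvL_append (xs ys : List Char) (i : Int) :
    pvL (xs ++ ys) i = pvL xs i + pvL ys (i - xs.length) := by
  induction xs generalizing i with
  | nil => simp [pvL]
  | cons c xs ih =>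
      simp only [List.cons_append, pvL, ih, List.length_cons]
      push_cast
      rw [show i - 1 - (xs.length : Int) = i - ((xs.length : Int) + 1) by ring]
      ring

theorem pvL_reverse (cs : List Char) (i : Int) :
    pvL cs.reverse ((cs.length : Int) - 1 - i) = pvR cs i := by
  induction cs generalizing i with
  | nil => simp [pvL, pvR]
  | cons c cs ih =>
      rw [List.reverse_cons, pvL_append]
      have e1 : (((c :: cs).length : Int) - 1 - i) = (cs.length : Int) - 1 - (i - 1) := by
        simp only [List.length_cons]
        push_cast
        ring
      rw [e1, ih]
      have e2 : pvL [c] ((cs.length : Int) - 1 - (i - 1) - ((cs.reverse.length : Int)))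
          = (if c = '1' then max (-i) 0 else 0) := by
        simp only [pvL, List.length_reverse, add_zero]
        rw [show (cs.length : Int) - 1 - (i - 1) - ((cs.length : Int)) = -i by ring]
      rw [e2]
      rw [show pvR (c :: cs) i = (if c = '1' then max (-i) 0 else 0) + pvR cs (i - 1) from rfl]
      ring

theorem pvSweep_eq (cs : List Char) (cnt ops : Int) :
    pvSweep cs cnt ops =
      (List.range cs.length).map (fun (k : Nat) => ops + cnt * ((k : Int)) + pvL cs ((k : Int))) := by
  induction cs generalizing cnt ops with
  | nil => simp [pvSweep]
  | cons c cs ih =>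
      simp only [pvSweep, List.length_cons, List.range_succ_eq_map, List.map_cons,
        List.map_map, ih]
      congr 1
      · have h0 : pvL (c :: cs) (0 : Int) = 0 := by
          rw [pvL, pvL_nonpos cs ((0 : Int) - 1) (by omega)]
          simp
        simp [h0]
      · apply List.map_congr_left
        intro k _
        simp only [Function.comp_apply, pvL]
        push_cast
        rw [show ((k : Int) + 1 - 1) = (k : Int) by ring]
        have h2 : max ((k : Int) + 1) 0 = (k : Int) + 1 := by omega
        rw [h2]
        split_ifs with h
        · ring
        · ring

theorem rev_map_range (n : Nat) (g : Nat → Int) :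
    ((List.range n).map g).reverse = (List.range n).map (fun k => g (n - 1 - k)) := by
  apply List.ext_getElem
  · simp
  · intro i h1 h2
    simp only [List.length_reverse, List.length_map, List.length_range] at h1 h2
    rw [List.getElem_reverse]
    simp only [List.getElem_map, List.getElem_range, List.length_map, List.length_range]

theorem zipWith_add_map {α : Type} (l : List α) (g h : α → Int) :
    List.zipWith (· + ·) (l.map g) (l.map h) = l.map (fun k => g k + h k) := by
  induction l with
  | nil => rfl
  | cons x l ih => simp [ih]

theorem aFold (cs : List Char) (i x : Int) :
    ((List.range cs.length).filter (fun k => cs[k]? == some '1')).foldl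
        (fun (acc : Int) (k : Nat) => acc + |i - ((k : Int))|) x = x + pvF cs i := by
  induction cs generalizing i x with
  | nil => simp [pvF]
  | cons c cs ih =>
      simp only [List.length_cons, List.range_succ_eq_map, List.filter_cons,
        List.filter_map, pvF]
      have hshift : ∀ (y : Int),
          ((List.filter ((fun k => (c :: cs)[k]? == some '1') ∘ Nat.succ)
              (List.range cs.length)).map Nat.succ).foldl
            (fun (acc : Int) (k : Nat) => acc + |i - ((k : Int))|) y = y + pvF cs (i - 1) := by
        intro y
        rw [List.foldl_map]
        have hpred : ((fun k => (c :: cs)[k]? == some '1') ∘ Nat.succ)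
            = fun (k : Nat) => cs[k]? == some '1' := by
          funext k; simp [Function.comp]
        have hf : (fun (acc : Int) (k : Nat) => acc + |i - ((Nat.succ k : Nat) : Int)|)
            = fun (acc : Int) (k : Nat) => acc + |(i - 1) - ((k : Int))| := by
          funext acc k
          congr 1
          push_cast
          ring
        rw [hpred, hf, ih (i - 1) y]
      by_cases hc : c = '1'
      · have hhead : ((c :: cs)[0]? == some '1') = true := by simp [hc]
        simp only [hhead, if_true, List.foldl_cons]
        rw [hshift]
        rw [show |i - (((0 : Nat)) : Int)| = |i| by norm_num, if_pos hc]
        ring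
      · have hhead : ((c :: cs)[0]? == some '1') = false := by simp [hc]
        simp only [hhead, Bool.false_eq_true, if_false]
        rw [hshift, if_neg hc]
        ring

theorem minOperations_eq_map (boxes : String) :
    minOperations boxes = (List.range boxes.toList.length).map (fun (k : Nat) => pvF boxes.toList ((k : Int))) := by
  show (PySem.List.pyRange 0 ((boxes.toList.length : Int)) 1).map
      (fun i => ((PySem.List.pyRange 0 ((boxes.toList.length : Int)) 1).filter
          (fun j => PySem.List.pyGet? boxes.toList j == some '1')).foldl
        (fun x j => x + |i - j|) 0) = _
  set cs := boxes.toList with hcs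
  have hr : PySem.List.pyRange 0 (cs.length : Int) 1 = (List.range cs.length).map (fun (k : Nat) => ((k : Int))) := by
    rw [PySem.List.pyRange_one]
    simp
  rw [hr, List.filter_map, List.map_map]
  apply List.map_congr_left
  intro k _
  simp only [Function.comp_apply]
  rw [List.foldl_map]
  have hp : (fun j : Nat => PySem.List.pyGet? cs (j : Int) == some '1')
      = fun j : Nat => cs[j]? == some '1' := by
    funext j; simp [PySem.List.pyGet?_natCast]
  have hcomp : ((fun j => PySem.List.pyGet? cs j == some '1') ∘ (fun (k : Nat) => ((k : Int))))
      = fun (j : Nat) => cs[j]? == some '1' := by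
    funext j
    simp [PySem.List.pyGet?_natCast]
  rw [hcomp]
  simpa using aFold cs (k : Int) 0

theorem minOperations_alt_eq_map (boxes : String) :
    minOperations_alt boxes = (List.range boxes.toList.length).map (fun (k : Nat) => pvF boxes.toList ((k : Int))) := by
  show List.zipWith (· + ·) (pvSweep boxes.toList 0 0) ((pvSweep boxes.toList.reverse 0 0).reverse) = _
  set cs := boxes.toList with hcs
  rw [pvSweep_eq, pvSweep_eq, List.length_reverse, rev_map_range, zipWith_add_map]
  apply List.map_congr_left
  intro k hk
  rw [List.mem_range] at hk
  simp only [zero_mul, zero_add]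
  have hcast : ((cs.length - 1 - k : Nat) : Int) = (cs.length : Int) - 1 - (k : Int) := by
    omega
  rw [hcast, pvL_reverse, pvF_split]

-- ===== VERDICT (by name: the statement is the Claim_ definition above) =====
theorem minOperations_spec : Claim_equal_minOperations := by
  intro boxes _
  show minOperations boxes = minOperations_alt boxes
  rw [minOperations_eq_map, minOperations_alt_eq_map]
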